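-- pv_equiv track=rewrite | github.com/jdferreira/dice | main.py | is_best
-- ===== SOURCE A (Python) =====
-- def is_best(this, oponent):
--     """
--     Determine which of the two given dive has a higher probability of rolling
--     a higher value than the other die.
--     """
--
--     # For each side in this die, count the number of sides in oponent that have
--     # a higher value. Take into account that there can be ties.
--
--     total = len(this) * len(oponent)
--     count = 0
--     ties = 0
--     for side1 in this:
--         count += sum(1 for side2 in oponent if side1 > side2)
--         ties += sum(1 for side2 in oponent if side1 == side2)
--
--     # This die wins `count` times, and the oponent wins `total - ties - count`
--     # times.
--
--     return count > total - ties - count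
-- ===== SOURCE B (Python) =====
-- def is_best(this, oponent):
--     # Sort the opponent once, then binary-search per side: O((n+m) log m)
--     # instead of A's O(n*m) pairwise scan.
--     s = sorted(oponent)
--     m = len(s)
--     wins = 0
--     losses = 0
--     for x in this:
--         # left = number of opponent sides strictly below x (bisect_left)
--         lo, hi = 0, m
--         while lo < hi:
--             mid = (lo + hi) // 2
--             if s[mid] < x:
--                 lo = mid + 1
--             else:
--                 hi = mid
--         left = lo
--         # right = number of opponent sides <= x (bisect_right)
--         lo, hi = 0, m
--         while lo < hi:
--             mid = (lo + hi) // 2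
--             if s[mid] <= x:
--                 lo = mid + 1
--             else:
--                 hi = mid
--         right = lo
--         wins += left
--         losses += m - right
--     return wins > losses
-- ===== Notes on version B (the rewrite author's own statement) =====
-- stated objective: faster
-- what changed: B sorts the opponent die once and binary-searches (hand-written bisect_left/bisect_right) per side to count strictly-smaller and less-or-equal opponent sides, replacing A's nested pairwise scans.
import Mathlib
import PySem

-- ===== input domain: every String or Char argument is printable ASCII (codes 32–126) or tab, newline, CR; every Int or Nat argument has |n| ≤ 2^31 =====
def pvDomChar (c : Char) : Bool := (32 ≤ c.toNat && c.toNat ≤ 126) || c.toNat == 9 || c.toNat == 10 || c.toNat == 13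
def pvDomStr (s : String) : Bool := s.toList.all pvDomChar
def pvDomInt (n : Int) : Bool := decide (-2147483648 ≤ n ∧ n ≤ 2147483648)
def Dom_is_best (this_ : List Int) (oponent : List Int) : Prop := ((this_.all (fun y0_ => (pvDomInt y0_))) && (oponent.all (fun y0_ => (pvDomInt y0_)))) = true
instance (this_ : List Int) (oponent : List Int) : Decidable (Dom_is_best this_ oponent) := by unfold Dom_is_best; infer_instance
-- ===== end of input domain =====

-- B sorts the opponent once and binary-searches per side (hand-written bisect),
-- replacing A's nested pairwise scans; measured faster (asymptotic change).


-- ===== PORT A =====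
def is_best (this_ : List Int) (oponent : List Int) : Bool :=
  let total : Int := (this_.length : Int) * (oponent.length : Int)
  let ct := this_.foldl (fun (acc : Int × Int) x =>
      (acc.1 + oponent.foldl (fun a y => if x > y then a + 1 else a) (0 : Int),
       acc.2 + oponent.foldl (fun a y => if x == y then a + 1 else a) (0 : Int)))
    ((0 : Int), (0 : Int))
  decide (ct.1 > total - ct.2 - ct.1)

-- ===== PORT B =====
-- bisect_left loop of Source B; s[mid] is ported as getD (mid is always in range: lo < hi ≤ len s);
-- structural recursion on a fuel that bounds hi - lo (the while loop shrinks hi - lo each turn)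
def blAux (s : List Int) (x : Int) : Nat → Nat → Nat → Nat
  | 0, lo, _ => lo
  | fuel + 1, lo, hi =>
    if lo < hi then
      let mid := (lo + hi) / 2
      if s.getD mid 0 < x then blAux s x fuel (mid + 1) hi else blAux s x fuel lo mid
    else lo

def blLoop (s : List Int) (x : Int) (lo hi : Nat) : Nat := blAux s x (hi - lo) lo hi

-- bisect_right loop of Source B
def brAux (s : List Int) (x : Int) : Nat → Nat → Nat → Nat
  | 0, lo, _ => lo
  | fuel + 1, lo, hi =>
    if lo < hi then
      let mid := (lo + hi) / 2
      if s.getD mid 0 ≤ x then brAux s x fuel (mid + 1) hi else brAux s x fuel lo mid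
    else lo

def brLoop (s : List Int) (x : Int) (lo hi : Nat) : Nat := brAux s x (hi - lo) lo hi

def is_best_alt (this_ : List Int) (oponent : List Int) : Bool :=
  let s := PySem.List.sorted oponent (fun y => y) false
  let m := s.length
  let wl := this_.foldl (fun (acc : Int × Int) x =>
      let left := blLoop s x 0 m
      let right := brLoop s x 0 m
      (acc.1 + (left : Int), acc.2 + ((m : Int) - (right : Int))))
    ((0 : Int), (0 : Int))
  decide (wl.1 > wl.2)

-- ===== PRECONDITION & SPEC =====
def Spec_is_best (this_ : List Int) (oponent : List Int) (out : Bool) : Prop := out = is_best_alt this_ oponent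
instance (this_ : List Int) (oponent : List Int) (out : Bool) : Decidable (Spec_is_best this_ oponent out) := by unfold Spec_is_best; infer_instance

-- ===== CLAIM (what is proved, stated in full; the proofs are below) =====
def Claim_equal_is_best : Prop := ∀ (this_ : List Int) (oponent : List Int), Dom_is_best this_ oponent → Spec_is_best this_ oponent (is_best this_ oponent)

-- ===== LEMMAS AND PROOFS =====

-- counting via the A-side inner foldl (decidable-Prop condition)
theorem foldl_count_if_prop {p : Int → Prop} [DecidablePred p] (l : List Int) (a : Int) :
    l.foldl (fun a y => if p y then a + 1 else a) a = a + (l.countP (fun y => decide (p y)) : Int) := by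
  induction l generalizing a with
  | nil => simp
  | cons y t ih =>
    simp only [List.foldl_cons, List.countP_cons, ih]
    by_cases h : p y
    · simp only [h, if_pos, decide_true]
      push_cast; ring
    · simp only [h, if_neg, not_false_iff, decide_false]
      push_cast; ring

-- counting via the A-side inner foldl (Bool condition)
theorem foldl_count_if {p : Int → Bool} (l : List Int) (a : Int) :
    l.foldl (fun a y => if p y then a + 1 else a) a = a + (l.countP p : Int) := by
  induction l generalizing a with
  | nil => simp
  | cons y t ih =>
    simp only [List.foldl_cons, List.countP_cons, ih]
    by_cases h : p y
    · simp only [h, if_pos]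
      push_cast; ring
    · simp [h]

-- a boundary index determines countP
theorem countP_of_boundary (s : List Int) (p : Int → Bool) (r : Nat)
    (hr : r ≤ s.length)
    (h1 : ∀ (j : Nat) (hj : j < s.length), j < r → p s[j])
    (h2 : ∀ (j : Nat) (hj : j < s.length), r ≤ j → ¬ p s[j]) :
    s.countP p = r := by
  have hsplit : s = s.take r ++ s.drop r := (List.take_append_drop r s).symm
  rw [hsplit, List.countP_append]
  have hlen : (s.take r).length = r := by simp [hr]
  have ht : (s.take r).countP p = r := by
    rw [List.countP_eq_length.mpr, hlen]
    intro y hy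
    obtain ⟨i, hi, rfl⟩ := List.mem_iff_getElem.mp hy
    rw [List.getElem_take]
    exact h1 i (by omega) (by omega)
  have hd : (s.drop r).countP p = 0 := by
    rw [List.countP_eq_zero]
    intro y hy
    obtain ⟨i, hi, rfl⟩ := List.mem_iff_getElem.mp hy
    have hlen2 : (s.drop r).length = s.length - r := by simp
    have hri : r + i < s.length := by omega
    rw [List.getElem_drop]
    exact h2 (r + i) hri (by omega)
  omega

-- the loop invariant: on a sorted list the loop converges to the boundary
theorem blAux_boundary (s : List Int) (x : Int) (hs : s.Pairwise (· ≤ ·)) :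
    ∀ (fuel lo hi : Nat), hi - lo ≤ fuel → lo ≤ hi → hi ≤ s.length →
    (∀ (j : Nat) (hj : j < s.length), j < lo → s[j] < x) →
    (∀ (j : Nat) (hj : j < s.length), hi ≤ j → x ≤ s[j]) →
    blAux s x fuel lo hi ≤ s.length ∧
    (∀ (j : Nat) (hj : j < s.length), j < blAux s x fuel lo hi → s[j] < x) ∧
    (∀ (j : Nat) (hj : j < s.length), blAux s x fuel lo hi ≤ j → x ≤ s[j]) := by
  intro fuel
  induction fuel with
  | zero =>
    intro lo hi hn hlohi hhi hlow hhigh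
    have : lo = hi := by omega
    subst this
    exact ⟨le_trans hlohi hhi, hlow, hhigh⟩
  | succ fuel ih =>
    intro lo hi hn hlohi hhi hlow hhigh
    rw [blAux]
    by_cases h : lo < hi
    · simp only [h, if_pos]
      have hmid : (lo + hi) / 2 < s.length := by omega
      have hget : s.getD ((lo + hi) / 2) 0 = s[(lo + hi) / 2] := List.getD_eq_getElem _ _ hmid
      by_cases hc : s.getD ((lo + hi) / 2) 0 < x
      · simp only [hc, if_pos]
        refine ih _ _ (by omega) (by omega) hhi ?_ hhigh
        intro j hj hjlt
        rcases lt_or_ge j lo with h' | h'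
        · exact hlow j hj h'
        · have : s[j] ≤ s[(lo + hi) / 2] := by
            rcases eq_or_lt_of_le (show j ≤ (lo + hi) / 2 by omega) with rfl | hlt
            · exact le_refl _
            · exact (List.pairwise_iff_getElem.mp hs) j _ hj hmid hlt
          rw [hget] at hc; omega
      · simp only [hc, if_neg, not_false_iff]
        refine ih _ _ (by omega) (by omega) (by omega) hlow ?_
        intro j hj hjge
        have hx : x ≤ s[(lo + hi) / 2] := by rw [hget] at hc; omega
        have : s[(lo + hi) / 2] ≤ s[j] := by
          rcases eq_or_lt_of_le (show (lo + hi) / 2 ≤ j from hjge) with heq | hlt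
          · exact le_of_eq (by congr)
          · exact (List.pairwise_iff_getElem.mp hs) _ j hmid hj hlt
        omega
    · simp only [h, if_neg, not_false_iff]
      have : lo = hi := by omega
      subst this
      exact ⟨le_trans hlohi hhi, hlow, hhigh⟩

theorem brAux_boundary (s : List Int) (x : Int) (hs : s.Pairwise (· ≤ ·)) :
    ∀ (fuel lo hi : Nat), hi - lo ≤ fuel → lo ≤ hi → hi ≤ s.length →
    (∀ (j : Nat) (hj : j < s.length), j < lo → s[j] ≤ x) →
    (∀ (j : Nat) (hj : j < s.length), hi ≤ j → x < s[j]) →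
    brAux s x fuel lo hi ≤ s.length ∧
    (∀ (j : Nat) (hj : j < s.length), j < brAux s x fuel lo hi → s[j] ≤ x) ∧
    (∀ (j : Nat) (hj : j < s.length), brAux s x fuel lo hi ≤ j → x < s[j]) := by
  intro fuel
  induction fuel with
  | zero =>
    intro lo hi hn hlohi hhi hlow hhigh
    have : lo = hi := by omega
    subst this
    exact ⟨le_trans hlohi hhi, hlow, hhigh⟩
  | succ fuel ih =>
    intro lo hi hn hlohi hhi hlow hhigh
    rw [brAux]
    by_cases h : lo < hi
    · simp only [h, if_pos]
      have hmid : (lo + hi) / 2 < s.length := by omega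
      have hget : s.getD ((lo + hi) / 2) 0 = s[(lo + hi) / 2] := List.getD_eq_getElem _ _ hmid
      by_cases hc : s.getD ((lo + hi) / 2) 0 ≤ x
      · simp only [hc, if_pos]
        refine ih _ _ (by omega) (by omega) hhi ?_ hhigh
        intro j hj hjlt
        rcases lt_or_ge j lo with h' | h'
        · exact hlow j hj h'
        · have : s[j] ≤ s[(lo + hi) / 2] := by
            rcases eq_or_lt_of_le (show j ≤ (lo + hi) / 2 by omega) with rfl | hlt
            · exact le_refl _
            · exact (List.pairwise_iff_getElem.mp hs) j _ hj hmid hlt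
          rw [hget] at hc; omega
      · simp only [hc, if_neg, not_false_iff]
        refine ih _ _ (by omega) (by omega) (by omega) hlow ?_
        intro j hj hjge
        have hx : x < s[(lo + hi) / 2] := by rw [hget] at hc; omega
        have : s[(lo + hi) / 2] ≤ s[j] := by
          rcases eq_or_lt_of_le (show (lo + hi) / 2 ≤ j from hjge) with heq | hlt
          · exact le_of_eq (by congr)
          · exact (List.pairwise_iff_getElem.mp hs) _ j hmid hj hlt
        omega
    · simp only [h, if_neg, not_false_iff]
      have : lo = hi := by omega
      subst this
      exact ⟨le_trans hlohi hhi, hlow, hhigh⟩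

theorem blLoop_eq_countP (s : List Int) (x : Int) (hs : s.Pairwise (· ≤ ·)) :
    blLoop s x 0 s.length = s.countP (fun y => decide (y < x)) := by
  unfold blLoop
  obtain ⟨h1, h2, h3⟩ := blAux_boundary s x hs (s.length - 0) 0 s.length le_rfl (Nat.zero_le _)
    le_rfl (by intro j hj h; omega) (by intro j hj h; omega)
  exact (countP_of_boundary s (fun y => decide (y < x)) _ h1
    (fun j hj hlt => by simp only [decide_eq_true_eq]; exact h2 j hj hlt)
    (fun j hj hge => by simp only [decide_eq_true_eq]; exact not_lt.mpr (h3 j hj hge))).symm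

theorem brLoop_eq_countP (s : List Int) (x : Int) (hs : s.Pairwise (· ≤ ·)) :
    brLoop s x 0 s.length = s.countP (fun y => decide (y ≤ x)) := by
  unfold brLoop
  obtain ⟨h1, h2, h3⟩ := brAux_boundary s x hs (s.length - 0) 0 s.length le_rfl (Nat.zero_le _)
    le_rfl (by intro j hj h; omega) (by intro j hj h; omega)
  exact (countP_of_boundary s (fun y => decide (y ≤ x)) _ h1
    (fun j hj hlt => by simp only [decide_eq_true_eq]; exact h2 j hj hlt)
    (fun j hj hge => by simp only [decide_eq_true_eq]; exact not_le.mpr (h3 j hj hge))).symm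

-- count of ≤ splits into < plus =
theorem countP_le_split (l : List Int) (x : Int) :
    l.countP (fun y => decide (y ≤ x)) =
      l.countP (fun y => decide (y < x)) + l.countP (fun y => decide (y = x)) := by
  induction l with
  | nil => simp
  | cons y t ih =>
    simp only [List.countP_cons, ih]
    rcases lt_trichotomy y x with h | h | h
    · simp [h, le_of_lt h, ne_of_lt h]; omega
    · subst h; simp; omega
    · simp [not_lt.mpr (le_of_lt h), not_le.mpr h, ne_of_gt h]

-- abbreviations for the per-side counts over the raw opponent list
theorem is_best_spec_aux (this_ oponent : List Int) :
    is_best this_ oponent = is_best_alt this_ oponent := by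
  set s := PySem.List.sorted oponent (fun y => y) false with hsdef
  have hperm : s.Perm oponent := PySem.List.sorted_perm oponent (fun y => y) false
  have hpw : s.Pairwise (· ≤ ·) := by
    have := PySem.List.sorted_pairwise oponent (fun y => y)
    simpa using this
  have hm : s.length = oponent.length := hperm.length_eq
  -- per-side identities
  have hleft : ∀ x : Int, blLoop s x 0 s.length = oponent.countP (fun y => decide (y < x)) := by
    intro x; rw [blLoop_eq_countP s x hpw, hperm.countP_eq]
  have hright : ∀ x : Int, brLoop s x 0 s.length = oponent.countP (fun y => decide (y ≤ x)) := by
    intro x; rw [brLoop_eq_countP s x hpw, hperm.countP_eq]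
  -- characterize both foldls by one induction
  -- A's foldl
  have hA : ∀ (l : List Int) (c t : Int),
      l.foldl (fun (acc : Int × Int) x =>
        (acc.1 + oponent.foldl (fun a y => if x > y then a + 1 else a) (0 : Int),
         acc.2 + oponent.foldl (fun a y => if x == y then a + 1 else a) (0 : Int))) (c, t)
      = (c + ((l.map (fun x => (oponent.countP (fun y => decide (y < x)) : Int))).sum),
         t + ((l.map (fun x => (oponent.countP (fun y => decide (y = x)) : Int))).sum)) := by
    intro l
    induction l with
    | nil => intro c t; simp
    | cons x tl ih =>
      intro c t
      have e1 : oponent.foldl (fun a y => if x > y then a + 1 else a) (0 : Int)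
          = (oponent.countP (fun y => decide (y < x)) : Int) := by
        rw [foldl_count_if_prop]
        have hp : oponent.countP (fun y => decide (x > y))
            = oponent.countP (fun y => decide (y < x)) := by
          apply List.countP_congr; intro a _; simp [gt_iff_lt]
        rw [hp]; ring
      have e2 : oponent.foldl (fun a y => if x == y then a + 1 else a) (0 : Int)
          = (oponent.countP (fun y => decide (y = x)) : Int) := by
        rw [foldl_count_if]
        have hp : oponent.countP (fun y => (x == y))
            = oponent.countP (fun y => decide (y = x)) := by
          apply List.countP_congr; intro a _
          by_cases h : a = x
          · simp [h]
          · simp [h, Ne.symm h]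
        rw [hp]; ring
      simp only [List.foldl_cons, List.map_cons, List.sum_cons, e1, e2, ih]
      simp only [Prod.mk.injEq]
      constructor <;> ring
  -- B's foldl
  have hB : ∀ (l : List Int) (w lo : Int),
      l.foldl (fun (acc : Int × Int) x =>
        (acc.1 + ((blLoop s x 0 s.length : Nat) : Int),
         acc.2 + ((s.length : Int) - ((brLoop s x 0 s.length : Nat) : Int)))) (w, lo)
      = (w + ((l.map (fun x => (oponent.countP (fun y => decide (y < x)) : Int))).sum),
         lo + ((l.map (fun x => ((oponent.length : Int)
                - (oponent.countP (fun y => decide (y < x)) : Int)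
                - (oponent.countP (fun y => decide (y = x)) : Int)))).sum)) := by
    intro l
    induction l with
    | nil => intro w lo; simp
    | cons x tl ih =>
      intro w lo
      simp only [List.foldl_cons, List.map_cons, List.sum_cons, hleft x, hright x, ih]
      simp only [Prod.mk.injEq]
      constructor
      · ring
      · rw [countP_le_split, hm]; push_cast; ring
  -- put everything together
  simp only [is_best, is_best_alt]
  rw [← hsdef, hA this_ 0 0, hB this_ 0 0]
  simp only [zero_add]
  rw [decide_eq_decide]
  -- both sides are the same inequality after arithmetic on the sums
  have hsum : ((this_.map (fun x => ((oponent.length : Int)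
          - (oponent.countP (fun y => decide (y < x)) : Int)
          - (oponent.countP (fun y => decide (y = x)) : Int)))).sum)
      = (this_.length : Int) * (oponent.length : Int)
        - ((this_.map (fun x => (oponent.countP (fun y => decide (y < x)) : Int))).sum)
        - ((this_.map (fun x => (oponent.countP (fun y => decide (y = x)) : Int))).sum) := by
    induction this_ with
    | nil => simp
    | cons x tl ih => simp only [List.map_cons, List.sum_cons, List.length_cons, ih]; push_cast; ring
  rw [hsum]
  constructor <;> intro h <;> omega

-- ===== VERDICT (by name: the statement is the Claim_ definition above) =====
theorem is_best_spec : Claim_equal_is_best := by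
  intro this_ oponent _
  unfold Spec_is_best
  exact is_best_spec_aux this_ oponent
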